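-- pv_equiv track=rewrite | github.com/dip-hue/SCFR_clone | scripts/find_stop_codon_free_regions_with_reverse_gap_report.py | find_stop_codon_free_regions
-- ===== SOURCE A (Python) =====
-- STOP_CODONS = {"TAA", "TAG", "TGA"}
--
-- def find_stop_codon_free_regions(seq, frame, seq_id, strand="+"):
--     """
--     Identifies all stop-codon-free regions in a given reading frame.
--
--     Parameters:
--     - seq: Biopython Seq object
--     - frame: Reading frame (0, 1, or 2)
--     - seq_id: FASTA record ID
--     - strand: '+' for forward, '-' for reverse
--
--     Returns:
--     - List of tuples: (seq_id, start, end, frame_number)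
--     """
--     results = []
--     start = None
--     seq_len = len(seq)
--
--     for i in range(frame, seq_len - 2, 3):
--         codon = str(seq[i:i+3]).upper()
--         if codon in STOP_CODONS:
--             # End current region if a stop codon is found
--             if start is not None:
--                 end = i
--                 if end > start:
--                     if strand == "+":
--                         results.append((seq_id, start, end, frame + 1))
--                     else:
--                         # Adjust coordinates for reverse strand
--                         real_start = seq_len - end
--                         real_end = seq_len - start
--                         results.append((seq_id, real_start, real_end, -(frame + 1)))
--                 start = None
--         else:
--             # Start a new region if not already started
--             if start is None:
--                 start = i
--
--     # Handle tail (remaining sequence after last codon)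
--     if start is not None and seq_len - start >= 3:
--         if strand == "+":
--             results.append((seq_id, start, seq_len, frame + 1))
--         else:
--             real_start = 0
--             real_end = seq_len - start
--             results.append((seq_id, real_start, real_end, -(frame + 1)))
--
--     return results
-- ===== SOURCE B (Python) =====
-- STOP_CODONS = {"TAA", "TAG", "TGA"}
--
-- def find_stop_codon_free_regions(seq, frame, seq_id, strand="+"):
--     """Two-pass rewrite: locate the stop-codon positions first, then emit the
--     gaps between consecutive stops (and the tail run) as regions."""
--     seq_len = len(seq)
--     positions = list(range(frame, seq_len - 2, 3))
--     stops = [i for i in positions if str(seq[i:i+3]).upper() in STOP_CODONS]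
--     bounds = []
--     if positions:
--         prev = positions[0]
--         for s in stops:
--             if prev < s:
--                 bounds.append((prev, s))
--             prev = s + 3
--         if prev <= positions[-1]:
--             bounds.append((prev, seq_len))
--     if strand == "+":
--         return [(seq_id, b, e, frame + 1) for b, e in bounds]
--     return [(seq_id, seq_len - e, seq_len - b, -(frame + 1)) for b, e in bounds]
-- ===== Notes on version B (the rewrite author's own statement) =====
-- stated objective: alternative
-- what changed: Replaces A's single-pass start/stop toggle (open a region at the first non-stop codon, close it at the next stop) by a two-pass decomposition: first collect the list of stop-codon positions in the frame, then emit the gaps between consecutive stops (plus the head and tail runs) as regions, applying the strand coordinate transform in one final map.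
import Mathlib
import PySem

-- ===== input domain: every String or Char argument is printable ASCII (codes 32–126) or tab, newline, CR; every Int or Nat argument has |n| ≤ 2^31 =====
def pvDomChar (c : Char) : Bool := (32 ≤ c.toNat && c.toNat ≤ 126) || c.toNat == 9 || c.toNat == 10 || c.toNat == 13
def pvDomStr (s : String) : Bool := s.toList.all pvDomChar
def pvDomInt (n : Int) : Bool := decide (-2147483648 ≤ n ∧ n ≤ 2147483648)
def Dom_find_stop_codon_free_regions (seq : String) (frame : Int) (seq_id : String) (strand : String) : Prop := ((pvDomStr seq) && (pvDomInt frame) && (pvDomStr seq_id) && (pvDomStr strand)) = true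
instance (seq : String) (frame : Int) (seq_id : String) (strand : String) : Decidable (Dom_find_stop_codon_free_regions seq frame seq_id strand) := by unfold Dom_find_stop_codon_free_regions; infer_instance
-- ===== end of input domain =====

-- B replaces A's one-pass start/stop toggle by a two-pass decomposition (collect the stop-codon
-- positions first, then emit the gaps between consecutive stops); same return value, similar cost.

-- ===== PORT A =====
-- STOP_CODONS = {"TAA", "TAG", "TGA"}
def pvStopCodons : PySem.Set String := PySem.Set.ofList ["TAA", "TAG", "TGA"]

-- str(seq[i:i+3]).upper() in STOP_CODONS  (used verbatim by both Pythons)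
def pvIsStop (seq : String) (i : Int) : Bool :=
  PySem.Set.contains pvStopCodons (PySem.Str.upper (PySem.Str.slice seq (some i) (some (i + 3))))

-- the body of A's 'for i in range(frame, seq_len - 2, 3)' loop, state = (results, start)
def pvAStep (seqLen : Int) (seq seq_id strand : String) (frame : Int)
    (st : List (String × Int × Int × Int) × Option Int) (i : Int) :
    List (String × Int × Int × Int) × Option Int :=
  if pvIsStop seq i then
    match st.2 with
    | some start =>
        if start < i then
          if strand = "+" then (st.1 ++ [(seq_id, start, i, frame + 1)], none)
          else (st.1 ++ [(seq_id, seqLen - i, seqLen - start, -(frame + 1))], none)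
        else (st.1, none)
    | none => (st.1, none)
  else
    match st.2 with
    | none => (st.1, some i)
    | some start => (st.1, some start)

-- A's tail block after the loop ('if start is not None and seq_len - start >= 3: …')
def pvFinishA (seqLen : Int) (seq_id strand : String) (frame : Int)
    (r : List (String × Int × Int × Int) × Option Int) : List (String × Int × Int × Int) :=
  match r.2 with
  | some start =>
      if 3 ≤ seqLen - start then
        if strand = "+" then r.1 ++ [(seq_id, start, seqLen, frame + 1)]
        else r.1 ++ [(seq_id, 0, seqLen - start, -(frame + 1))]
      else r.1
  | none => r.1

def find_stop_codon_free_regions (seq : String) (frame : Int) (seq_id : String) (strand : String) : List (String × Int × Int × Int) :=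
  let seqLen := PySem.Str.len seq
  pvFinishA seqLen seq_id strand frame
    ((PySem.List.pyRange frame (seqLen - 2) 3).foldl (pvAStep seqLen seq seq_id strand frame) ([], none))

-- ===== PORT B =====
-- the body of B's 'for s in stops' loop, state = (bounds, prev)
def pvBStep (st : List (Int × Int) × Int) (s : Int) : List (Int × Int) × Int :=
  (st.1 ++ (if st.2 < s then [(st.2, s)] else []), s + 3)

def find_stop_codon_free_regions_alt (seq : String) (frame : Int) (seq_id : String) (strand : String) : List (String × Int × Int × Int) :=
  let seqLen := PySem.Str.len seq
  let positions := PySem.List.pyRange frame (seqLen - 2) 3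
  let stops := positions.filter (pvIsStop seq)
  let bounds : List (Int × Int) :=
    match positions with
    | [] => []
    | p0 :: rest =>
        let r := stops.foldl pvBStep ([], p0)
        if r.2 ≤ (p0 :: rest).getLast (List.cons_ne_nil _ _) then r.1 ++ [(r.2, seqLen)] else r.1
  if strand = "+" then bounds.map (fun be => (seq_id, be.1, be.2, frame + 1))
  else bounds.map (fun be => (seq_id, seqLen - be.2, seqLen - be.1, -(frame + 1)))

-- ===== PRECONDITION & SPEC =====
def Spec_find_stop_codon_free_regions (seq : String) (frame : Int) (seq_id : String) (strand : String) (out : List (String × Int × Int × Int)) : Prop := out = find_stop_codon_free_regions_alt seq frame seq_id strand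
instance (seq : String) (frame : Int) (seq_id : String) (strand : String) (out : List (String × Int × Int × Int)) : Decidable (Spec_find_stop_codon_free_regions seq frame seq_id strand out) := by unfold Spec_find_stop_codon_free_regions; infer_instance

-- ===== CLAIM (what is proved, stated in full; the proofs are below) =====
def Claim_equal_find_stop_codon_free_regions : Prop := ∀ (seq : String) (frame : Int) (seq_id : String) (strand : String), Dom_find_stop_codon_free_regions seq frame seq_id strand → Spec_find_stop_codon_free_regions seq frame seq_id strand (find_stop_codon_free_regions seq frame seq_id strand)

-- ===== LEMMAS AND PROOFS =====

-- the tuple both programs build from a (start, end) pair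
def pvOut (seqLen : Int) (seq_id strand : String) (frame : Int) (be : Int × Int) : String × Int × Int × Int :=
  if strand = "+" then (seq_id, be.1, be.2, frame + 1)
  else (seq_id, seqLen - be.2, seqLen - be.1, -(frame + 1))

-- A's toggle loop, reduced to the (start, end) pairs it emits (tail region included)
def pvCoreA (f : Int → Bool) (seqLen : Int) : List Int → Option Int → List (Int × Int)
  | [], none => []
  | [], some st => if 3 ≤ seqLen - st then [(st, seqLen)] else []
  | p :: ps, none => if f p then pvCoreA f seqLen ps none else pvCoreA f seqLen ps (some p)
  | p :: ps, some st =>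
      if f p then (if st < p then [(st, p)] else []) ++ pvCoreA f seqLen ps none
      else pvCoreA f seqLen ps (some st)

-- B's gap scan over the stop positions, as a recursion
def pvGaps (seqLen L : Int) : Int → List Int → List (Int × Int)
  | prev, [] => if prev ≤ L then [(prev, seqLen)] else []
  | prev, s :: ss => (if prev < s then [(prev, s)] else []) ++ pvGaps seqLen L (s + 3) ss

lemma pvA_loop (seq seq_id strand : String) (seqLen frame : Int) :
    ∀ (ps : List Int) (acc : List (String × Int × Int × Int)) (st? : Option Int),
      pvFinishA seqLen seq_id strand frame (ps.foldl (pvAStep seqLen seq seq_id strand frame) (acc, st?))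
        = acc ++ (pvCoreA (pvIsStop seq) seqLen ps st?).map (pvOut seqLen seq_id strand frame) := by
  intro ps
  induction ps with
  | nil =>
      intro acc st?
      cases st? with
      | none => simp [pvFinishA, pvCoreA]
      | some st =>
          by_cases h3 : 3 ≤ seqLen - st
          · by_cases hstr : strand = "+" <;>
              simp [pvFinishA, pvCoreA, pvOut, h3, hstr, sub_self]
          · simp [pvFinishA, pvCoreA, h3]
  | cons p ps ih =>
      intro acc st?
      by_cases hf : pvIsStop seq p = true
      · cases st? with
        | none =>
            simp only [List.foldl_cons, pvAStep, hf, if_pos]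
            rw [ih]
            simp [pvCoreA, hf]
        | some st =>
            by_cases hsp : st < p
            · by_cases hstr : strand = "+"
              · subst hstr
                simp only [List.foldl_cons, pvAStep, hf, hsp, if_pos]
                rw [ih]
                simp [pvCoreA, hf, hsp, pvOut]
              · simp only [List.foldl_cons, pvAStep, hf, hsp, hstr, if_pos, reduceIte]
                rw [ih]
                simp [pvCoreA, hf, hsp, pvOut, hstr]
            · simp only [List.foldl_cons, pvAStep, hf, if_pos, hsp, reduceIte]
              rw [ih]
              simp [pvCoreA, hf, hsp]
      · cases st? with
        | none =>
            simp only [List.foldl_cons, pvAStep, hf, Bool.false_eq_true, reduceIte]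
            rw [ih]
            simp [pvCoreA, hf]
        | some st =>
            simp only [List.foldl_cons, pvAStep, hf, Bool.false_eq_true, reduceIte]
            rw [ih]
            simp [pvCoreA, hf]

lemma pvB_loop (seqLen L : Int) :
    ∀ (stops : List Int) (acc : List (Int × Int)) (prev : Int),
      (if (stops.foldl pvBStep (acc, prev)).2 ≤ L
        then (stops.foldl pvBStep (acc, prev)).1 ++ [((stops.foldl pvBStep (acc, prev)).2, seqLen)]
        else (stops.foldl pvBStep (acc, prev)).1)
        = acc ++ pvGaps seqLen L prev stops := by
  intro stops
  induction stops with
  | nil =>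
      intro acc prev
      by_cases h : prev ≤ L <;> simp [pvGaps, h]
  | cons s ss ih =>
      intro acc prev
      simp only [List.foldl_cons, pvBStep]
      rw [ih]
      simp [pvGaps]

-- every element of a step-3 chain is at most its last element
lemma pvLast_bound :
    ∀ (ps : List Int), List.IsChain (fun a b : Int => b = a + 3) ps →
      ∀ (h : ps ≠ []) (p : Int), p ∈ ps → p ≤ ps.getLast h := by
  intro ps
  induction ps with
  | nil => intro _ h; exact absurd rfl h
  | cons q rest ih =>
      intro hch h p hp
      cases rest with
      | nil =>
          simp at hp
          simp [List.getLast, hp]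
      | cons q' rest' =>
          have hq : q' = q + 3 := (List.isChain_cons_cons.mp hch).1
          have hch' := (List.isChain_cons_cons.mp hch).2
          rw [List.getLast_cons (List.cons_ne_nil q' rest')]
          rcases List.mem_cons.mp hp with h1 | h2
          · have := ih hch' (List.cons_ne_nil q' rest') q' (List.mem_cons_self)
            omega
          · exact ih hch' (List.cons_ne_nil q' rest') p h2

lemma pvChain3 (a b : Int) :
    List.IsChain (fun x y : Int => y = x + 3) (PySem.List.pyRange a b 3) := by
  rw [PySem.List.pyRange_of_pos a b (by norm_num)]
  rw [List.isChain_map]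
  generalize (if a < b then ((b - a + 3 - 1) / 3).toNat else 0) = N
  cases N with
  | zero => simp
  | succ n =>
      rw [List.isChain_range_succ]
      intro m _
      push_cast
      ring

-- main correspondence: A's toggle pairs = B's stop-gap pairs, on a step-3 chain bounded by seqLen
lemma pvMain (f : Int → Bool) (seqLen L : Int) :
    ∀ (ps : List Int),
      List.IsChain (fun a b : Int => b = a + 3) ps →
      (∀ p ∈ ps, p + 3 ≤ seqLen ∧ p ≤ L) →
      (∀ h : ps ≠ [], ps.getLast h = L) →
      (∀ st : Int, st ≤ L → st + 3 ≤ seqLen →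
          pvCoreA f seqLen ps (some st) = pvGaps seqLen L st (ps.filter f))
        ∧ (pvCoreA f seqLen ps none
            = match ps with | [] => [] | p :: _ => pvGaps seqLen L p (ps.filter f)) := by
  intro ps
  induction ps with
  | nil =>
      intro _ _ _
      constructor
      · intro st hstL hst3
        simp only [pvCoreA, pvGaps, List.filter_nil]
        rw [if_pos (by omega : (3:Int) ≤ seqLen - st), if_pos (by omega : st ≤ L)]
      · simp [pvCoreA]
  | cons p rest ih =>
      intro hch hb hl
      have hch' : List.IsChain (fun a b : Int => b = a + 3) rest := by
        have := hch.tail; simpa using this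
      have hb' : ∀ q ∈ rest, q + 3 ≤ seqLen ∧ q ≤ L := fun q hq => hb q (List.mem_cons_of_mem p hq)
      have hl' : ∀ h : rest ≠ [], rest.getLast h = L := by
        intro h
        rw [← List.getLast_cons (a := p) h]
        exact hl (List.cons_ne_nil p rest)
      have hp := hb p List.mem_cons_self
      have K : pvCoreA f seqLen rest none = pvGaps seqLen L (p + 3) (rest.filter f) := by
        cases rest with
        | nil =>
            have hpl : p = L := by
              have := hl (List.cons_ne_nil p [])
              simpa [List.getLast] using this
            simp only [pvCoreA, pvGaps, List.filter_nil]
            rw [if_neg (by omega : ¬ (p + 3 ≤ L))]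
        | cons q rest' =>
            have hq : q = p + 3 := (List.isChain_cons_cons.mp hch).1
            have := (ih hch' hb' hl').2
            simpa [hq] using this
      constructor
      · intro st hstL hst3
        by_cases hf : f p = true
        · simp [pvCoreA, hf, pvGaps, K]
        · have := (ih hch' hb' hl').1 st hstL hst3
          simp [pvCoreA, hf, this]
      · by_cases hf : f p = true
        · simp [pvCoreA, hf, pvGaps, K]
        · have := (ih hch' hb' hl').1 p hp.2 hp.1
          simp [pvCoreA, hf, this]

-- ===== VERDICT (by name: the statement is the Claim_ definition above) =====
theorem find_stop_codon_free_regions_spec : Claim_equal_find_stop_codon_free_regions := by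
  intro seq frame seq_id strand _
  unfold Spec_find_stop_codon_free_regions
  unfold find_stop_codon_free_regions find_stop_codon_free_regions_alt
  simp only []
  rw [pvA_loop]
  cases hps : PySem.List.pyRange frame (PySem.Str.len seq - 2) 3 with
  | nil =>
      simp [pvCoreA]
  | cons p0 rest =>
      have hch : List.IsChain (fun a b : Int => b = a + 3) (p0 :: rest) := by
        rw [← hps]; exact pvChain3 _ _
      have hmem : ∀ p ∈ (p0 :: rest), p < PySem.Str.len seq - 2 := by
        intro p hp
        rw [← hps] at hp
        exact ((PySem.List.mem_pyRange_iff_of_pos (by norm_num) p).mp hp).2.1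
      have hlastb := pvLast_bound (p0 :: rest) hch (List.cons_ne_nil p0 rest)
      have hb : ∀ p ∈ (p0 :: rest),
          p + 3 ≤ PySem.Str.len seq ∧ p ≤ (p0 :: rest).getLast (List.cons_ne_nil p0 rest) := by
        intro p hp
        exact ⟨by have := hmem p hp; omega, hlastb p hp⟩
      have hl : ∀ h : (p0 :: rest) ≠ [],
          (p0 :: rest).getLast h = (p0 :: rest).getLast (List.cons_ne_nil p0 rest) := fun _ => rfl
      have hmain := (pvMain (pvIsStop seq) (PySem.Str.len seq)
        ((p0 :: rest).getLast (List.cons_ne_nil p0 rest)) (p0 :: rest) hch hb hl).2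
      rw [hmain]
      simp only [List.nil_append]
      rw [pvB_loop]
      by_cases hstr : strand = "+" <;> simp [hstr, pvOut]
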